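-- pv_equiv track=rewrite | github.com/ithras-founders/ithras | shared/search/institution_query.py | variants_for_token
-- ===== SOURCE A (Python) =====
-- _TOKEN_ALIASES: dict[str, tuple[str, ...]] = {
--     "bengaluru": ("bangalore",),
--     "bangalore": ("bengaluru",),
--     "kolkata": ("calcutta",),
--     "calcutta": ("kolkata",),
--     "mumbai": ("bombay",),
--     "bombay": ("mumbai",),
--     "chennai": ("madras",),
--     "madras": ("chennai",),
--     "puducherry": ("pondicherry",),
--     "pondicherry": ("puducherry",),
-- }
--
-- def variants_for_token(tok: str) -> list[str]:
--     s = {tok}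
--     alts = _TOKEN_ALIASES.get(tok)
--     if alts:
--         s.update(alts)
--     for key, vals in _TOKEN_ALIASES.items():
--         if tok in vals:
--             s.add(key)
--             s.update(vals)
--     return sorted(s)
-- ===== SOURCE B (Python) =====
-- def _build_groups() -> dict[str, list[str]]:
--     groups: dict[str, list[str]] = {}
--     for key, vals in _TOKEN_ALIASES.items():
--         groups[key] = sorted({key, *vals})
--     return groups
--
-- _TOKEN_ALIASES: dict[str, tuple[str, ...]] = {
--     "bengaluru": ("bangalore",),
--     "bangalore": ("bengaluru",),
--     "kolkata": ("calcutta",),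
--     "calcutta": ("kolkata",),
--     "mumbai": ("bombay",),
--     "bombay": ("mumbai",),
--     "chennai": ("madras",),
--     "madras": ("chennai",),
--     "puducherry": ("pondicherry",),
--     "pondicherry": ("puducherry",),
-- }
--
-- _GROUPS = _build_groups()
--
-- def variants_for_token(tok: str) -> list[str]:
--     g = _GROUPS.get(tok)
--     return list(g) if g is not None else [tok]
-- ===== Notes on version B (the rewrite author's own statement) =====
-- stated objective: alternative
-- what changed: B precomputes a module-level _GROUPS table mapping each known token to its sorted variant group (built once from _TOKEN_ALIASES), so each call is a single dict lookup instead of A's set-building plus full reverse scan of the alias dict.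
import Mathlib
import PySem

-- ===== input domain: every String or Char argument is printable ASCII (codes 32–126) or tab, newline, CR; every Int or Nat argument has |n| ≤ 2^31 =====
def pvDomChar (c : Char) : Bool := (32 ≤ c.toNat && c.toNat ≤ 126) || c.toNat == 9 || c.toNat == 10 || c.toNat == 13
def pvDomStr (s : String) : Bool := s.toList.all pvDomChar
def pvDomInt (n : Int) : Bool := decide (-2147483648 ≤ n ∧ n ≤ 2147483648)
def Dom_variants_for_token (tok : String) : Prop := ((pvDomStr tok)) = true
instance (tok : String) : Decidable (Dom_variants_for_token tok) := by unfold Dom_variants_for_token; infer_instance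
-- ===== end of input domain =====

-- B replaces A's per-call dict lookup + full reverse scan with a precomputed group table
-- (one lookup per call); objective: alternative/constant-factor, same return values.

-- ===== PORT A =====
def pyTokenAliases : PySem.Dict String (List String) :=
  PySem.Dict.ofList [
    ("bengaluru", ["bangalore"]),
    ("bangalore", ["bengaluru"]),
    ("kolkata", ["calcutta"]),
    ("calcutta", ["kolkata"]),
    ("mumbai", ["bombay"]),
    ("bombay", ["mumbai"]),
    ("chennai", ["madras"]),
    ("madras", ["chennai"]),
    ("puducherry", ["pondicherry"]),
    ("pondicherry", ["puducherry"])]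

def variants_for_token (tok : String) : List String :=
  let s : PySem.Set String := PySem.Set.ofList [tok]
  let alts := pyTokenAliases.get? tok
  -- 'if alts:' — truthy iff get returned a nonempty tuple
  let s := match alts with
    | some vs => if vs ≠ [] then PySem.Set.update s vs else s
    | none => s
  let s := pyTokenAliases.items.foldl (fun s (kv : String × List String) =>
    if tok ∈ kv.2 then PySem.Set.update (PySem.Set.add s kv.1) kv.2 else s) s
  PySem.List.sorted s (fun x => x) false

-- ===== PORT B =====
-- _GROUPS built once from _TOKEN_ALIASES: key ↦ sorted({key} ∪ vals)
def pyGroups : PySem.Dict String (List String) :=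
  PySem.Dict.ofList (pyTokenAliases.items.map (fun kv =>
    (kv.1, PySem.List.sorted (PySem.Set.update (PySem.Set.ofList [kv.1]) kv.2) (fun x => x) false)))

def variants_for_token_alt (tok : String) : List String :=
  match pyGroups.get? tok with
  | some g => g
  | none => [tok]

-- ===== PRECONDITION & SPEC =====
def Spec_variants_for_token (tok : String) (out : List String) : Prop := out = variants_for_token_alt tok
instance (tok : String) (out : List String) : Decidable (Spec_variants_for_token tok out) := by unfold Spec_variants_for_token; infer_instance

-- ===== CLAIM (what is proved, stated in full; the proofs are below) =====
def Claim_equal_variants_for_token : Prop := ∀ (tok : String), Dom_variants_for_token tok → Spec_variants_for_token tok (variants_for_token tok)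

-- ===== LEMMAS AND PROOFS =====

def pvKnown : List String :=
  ["bengaluru", "bangalore", "kolkata", "calcutta", "mumbai",
   "bombay", "chennai", "madras", "puducherry", "pondicherry"]

theorem pv_unknown (tok : String) (h : tok ∉ pvKnown) :
    variants_for_token tok = [tok] ∧ variants_for_token_alt tok = [tok] := by
  simp only [pvKnown, List.mem_cons, List.not_mem_nil, or_false, not_or] at h
  obtain ⟨h1, h2, h3, h4, h5, h6, h7, h8, h9, h10⟩ := h
  have b1 : ("bengaluru" == tok) = false := beq_eq_false_iff_ne.mpr (Ne.symm h1)
  have b2 : ("bangalore" == tok) = false := beq_eq_false_iff_ne.mpr (Ne.symm h2)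
  have b3 : ("kolkata" == tok) = false := beq_eq_false_iff_ne.mpr (Ne.symm h3)
  have b4 : ("calcutta" == tok) = false := beq_eq_false_iff_ne.mpr (Ne.symm h4)
  have b5 : ("mumbai" == tok) = false := beq_eq_false_iff_ne.mpr (Ne.symm h5)
  have b6 : ("bombay" == tok) = false := beq_eq_false_iff_ne.mpr (Ne.symm h6)
  have b7 : ("chennai" == tok) = false := beq_eq_false_iff_ne.mpr (Ne.symm h7)
  have b8 : ("madras" == tok) = false := beq_eq_false_iff_ne.mpr (Ne.symm h8)
  have b9 : ("puducherry" == tok) = false := beq_eq_false_iff_ne.mpr (Ne.symm h9)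
  have b10 : ("pondicherry" == tok) = false := beq_eq_false_iff_ne.mpr (Ne.symm h10)
  constructor
  · simp [variants_for_token, pyTokenAliases, PySem.Dict.ofList, PySem.Dict.get?,
      PySem.Dict.update, PySem.Dict.insert, PySem.Dict.contains, PySem.Dict.empty,
      PySem.Dict.items, PySem.Set.ofList, PySem.Set.add, PySem.Set.update,
      PySem.List.sorted, PySem.List.insertBy, List.find?,
      h1, h2, h3, h4, h5, h6, h7, h8, h9, h10, b1, b2, b3, b4, b5, b6, b7, b8, b9, b10]
  · simp [variants_for_token_alt, pyGroups, pyTokenAliases, PySem.Dict.ofList,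
      PySem.Dict.update, PySem.Dict.insert, PySem.Dict.contains, PySem.Dict.empty,
      PySem.Dict.get?, List.find?,
      b1, b2, b3, b4, b5, b6, b7, b8, b9, b10]

-- ===== VERDICT (by name: the statement is the Claim_ definition above) =====
theorem variants_for_token_spec : Claim_equal_variants_for_token := by
  intro tok _
  unfold Spec_variants_for_token
  by_cases h : tok ∈ pvKnown
  · fin_cases h <;> rfl
  · obtain ⟨ha, hb⟩ := pv_unknown tok h
    rw [ha, hb]
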